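-- pv_equiv track=rewrite | github.com/Edd17369/Algorithms | Hashing.py | divPairsHash
-- ===== SOURCE A (Python) =====
-- def divPairsHash(arr): # es el mejor si los int in arr no son muy grandes en comparacion a len(arr)
--     n = len(arr)
--     A = arr
--     m = max(A)
--     count = 0
--     for i in range(n):
--         k =  m // arr[i]
--         for j in range(2,k+1):
--             if arr[i] * j in A:
--                 count += 1
--     return count
-- ===== SOURCE B (Python) =====
-- def divPairsHash(arr):
--     m = max(arr)
--     seen = set(arr)
--     count = 0
--     for a in arr:
--         k = m // a
--         for v in seen:
--             if v % a == 0 and 2 <= v // a <= k: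
--                 count += 1
--     return count
-- ===== Notes on version B (the rewrite author's own statement) =====
-- stated objective: alternative
-- what changed: Instead of generating candidate multiples a*j for j in 2..m//a and testing each with a list-membership scan, B builds the set of present values once and, for each element a, scans the distinct values testing divisibility (v % a == 0 and 2 <= v//a <= m//a).
import Mathlib
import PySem

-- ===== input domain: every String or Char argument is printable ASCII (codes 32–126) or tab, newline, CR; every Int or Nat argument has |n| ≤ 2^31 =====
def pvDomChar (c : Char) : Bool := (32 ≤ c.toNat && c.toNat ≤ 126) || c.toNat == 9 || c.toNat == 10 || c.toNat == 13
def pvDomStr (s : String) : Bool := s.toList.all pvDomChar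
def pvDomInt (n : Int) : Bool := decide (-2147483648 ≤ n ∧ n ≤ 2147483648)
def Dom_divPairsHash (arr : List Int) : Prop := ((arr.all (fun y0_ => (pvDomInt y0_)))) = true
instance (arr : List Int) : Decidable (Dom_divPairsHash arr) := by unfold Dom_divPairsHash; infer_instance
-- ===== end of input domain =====

-- B builds the set of present values once and, per element, tests divisibility against those
-- distinct values, instead of generating candidate multiples and testing list membership.

-- ===== PORT A =====
def divPairsHash (arr : List Int) : Int :=
  match PySem.List.max? arr (fun x => x) with
  | none => 0          -- Python: max([]) raises ValueError; excluded by Pre_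
  | some m =>
    (PySem.List.pyRange 0 arr.length 1).foldl (fun count i =>
      let a := PySem.List.pyGetD arr i 0
      let k := PySem.Int.floordiv m a
      (PySem.List.pyRange 2 (k + 1) 1).foldl (fun c j =>
        if a * j ∈ arr then c + 1 else c) count) 0

-- ===== PORT B =====
def divPairsHash_alt (arr : List Int) : Int :=
  match PySem.List.max? arr (fun x => x) with
  | none => 0          -- Python: max(arr) raises ValueError; excluded by Pre_
  | some m =>
    let seen : PySem.Set Int := PySem.Set.ofList arr
    arr.foldl (fun count a =>
      let k := PySem.Int.floordiv m a
      seen.foldl (fun c v =>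
        if PySem.Int.mod v a = 0 ∧ 2 ≤ PySem.Int.floordiv v a ∧ PySem.Int.floordiv v a ≤ k
        then c + 1 else c) count) 0

-- ===== PRECONDITION & SPEC =====
-- Pre_ excludes exactly the inputs where A raises: the empty list (max -> ValueError)
-- and lists containing 0 (m // 0 -> ZeroDivisionError).
def Pre_divPairsHash (arr : List Int) : Prop := arr ≠ [] ∧ (0 : Int) ∉ arr
instance (arr : List Int) : Decidable (Pre_divPairsHash arr) := by unfold Pre_divPairsHash; infer_instance
def pvWitness_divPairsHash : List Int := [2, 4, 3, 8]

def Spec_divPairsHash (arr : List Int) (out : Int) : Prop := out = divPairsHash_alt arr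
instance (arr : List Int) (out : Int) : Decidable (Spec_divPairsHash arr out) := by unfold Spec_divPairsHash; infer_instance

-- ===== CLAIM (what is proved, stated in full; the proofs are below) =====
def Claim_equal_divPairsHash : Prop := ∀ (arr : List Int), Dom_divPairsHash arr → Pre_divPairsHash arr → Spec_divPairsHash arr (divPairsHash arr)

-- ===== LEMMAS AND PROOFS =====

theorem fdiv_mul_self (a j : Int) (ha : a ≠ 0) : PySem.Int.floordiv (a * j) a = j := by
  have hd : PySem.Int.mod (a * j) a = 0 := (PySem.Int.mod_eq_zero_iff_dvd _ _).2 (dvd_mul_right a j)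
  have h := PySem.Int.floordiv_mul_add_mod (a * j) a
  rw [hd, add_zero] at h
  exact mul_right_cancel₀ ha (by linarith)

theorem mul_fdiv_of_mod_zero (v a : Int) (h : PySem.Int.mod v a = 0) :
    a * PySem.Int.floordiv v a = v := by
  have h2 := PySem.Int.floordiv_mul_add_mod v a
  rw [h, add_zero] at h2; linarith

-- For a ≠ 0, j ↦ a*j is a bijection between the j ∈ [2,k] with a*j present in arr
-- and the distinct present values v with v % a == 0 and 2 ≤ v//a ≤ k.
theorem inner_count_eq (arr : List Int) (a k : Int) (ha : a ≠ 0) :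
    (PySem.List.pyRange 2 (k + 1) 1).countP (fun j => decide (a * j ∈ arr)) =
    (PySem.Set.ofList arr).countP
      (fun v => decide (PySem.Int.mod v a = 0 ∧ 2 ≤ PySem.Int.floordiv v a ∧ PySem.Int.floordiv v a ≤ k)) := by
  rw [List.countP_eq_length_filter, List.countP_eq_length_filter,
    ← List.toFinset_card_of_nodup ((PySem.List.nodup_pyRange_one 2 (k + 1)).filter _),
    ← List.toFinset_card_of_nodup ((PySem.Set.nodup_ofList arr).filter _)]
  apply Finset.card_bij (fun j _ => a * j)
  · intro j hj
    simp only [List.mem_toFinset, List.mem_filter, PySem.List.mem_pyRange_one,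
      decide_eq_true_eq, PySem.Set.mem_ofList] at hj ⊢
    obtain ⟨⟨h2, hk⟩, hmem⟩ := hj
    refine ⟨hmem, ?_, ?_, ?_⟩
    · exact (PySem.Int.mod_eq_zero_iff_dvd _ _).2 (dvd_mul_right a j)
    · rw [fdiv_mul_self a j ha]; exact h2
    · rw [fdiv_mul_self a j ha]; omega
  · intro j1 h1 j2 h2 he
    exact mul_left_cancel₀ ha he
  · intro v hv
    simp only [List.mem_toFinset, List.mem_filter, PySem.Set.mem_ofList,
      decide_eq_true_eq] at hv
    obtain ⟨hmem, hmod, hlo, hhi⟩ := hv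
    refine ⟨PySem.Int.floordiv v a, ?_, mul_fdiv_of_mod_zero v a hmod⟩
    simp only [List.mem_toFinset, List.mem_filter, PySem.List.mem_pyRange_one,
      decide_eq_true_eq]
    exact ⟨⟨hlo, by omega⟩, by rw [mul_fdiv_of_mod_zero v a hmod]; exact hmem⟩

-- ===== VERDICT (by name: the statement is the Claim_ definition above) =====
theorem divPairsHash_spec : Claim_equal_divPairsHash := by
  intro arr _ hpre
  obtain ⟨hne, h0⟩ := hpre
  unfold Spec_divPairsHash divPairsHash divPairsHash_alt
  rcases hm : PySem.List.max? arr (fun x => x) with _ | m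
  · exact absurd ((PySem.List.max?_eq_none_iff arr _).1 hm) hne
  · simp only
    rw [PySem.List.foldl_pyRange_zero_pyGetD' arr 0
      (fun count a => (PySem.List.pyRange 2 (PySem.Int.floordiv m a + 1) 1).foldl
        (fun c j => if a * j ∈ arr then c + 1 else c) count) 0]
    apply PySem.List.foldl_congr_mem
    intro count a hmem
    have ha : a ≠ 0 := fun hz => h0 (hz ▸ hmem)
    rw [PySem.List.foldl_ite_add_one, PySem.List.foldl_ite_add_one,
      inner_count_eq arr a (PySem.Int.floordiv m a) ha]
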